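-- pv_equiv track=rewrite | github.com/RupertSaxton/advent-of-code | 2015/1/1.py | find_instruction_index
-- ===== SOURCE A (Python) =====
-- def find_instruction_index(instructions, target):
-- 	floor = 0
-- 	index = 0
--
-- 	for idx, paren in enumerate(instructions):
-- 		if paren == ')':
-- 			floor -= 1
-- 		elif paren == '(':
-- 			floor += 1
--
-- 		if floor == target:
-- 			index = idx
-- 			break
--
-- 	return index
-- ===== SOURCE B (Python) =====
-- def find_instruction_index(instructions, target):
-- 	delta = {'(': 1, ')': -1}
-- 	floors = []
-- 	f = 0
-- 	for c in instructions:
-- 		f += delta.get(c, 0)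
-- 		floors.append(f)
-- 	return floors.index(target) if target in floors else 0
-- ===== Notes on version B (the rewrite author's own statement) =====
-- stated objective: alternative
-- what changed: B builds the full prefix-sum (floor) list up front via a delta dictionary and then answers with a single list.index lookup (defaulting to 0), instead of A's fused loop that updates the floor, compares against target and breaks in one pass.
import Mathlib
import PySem

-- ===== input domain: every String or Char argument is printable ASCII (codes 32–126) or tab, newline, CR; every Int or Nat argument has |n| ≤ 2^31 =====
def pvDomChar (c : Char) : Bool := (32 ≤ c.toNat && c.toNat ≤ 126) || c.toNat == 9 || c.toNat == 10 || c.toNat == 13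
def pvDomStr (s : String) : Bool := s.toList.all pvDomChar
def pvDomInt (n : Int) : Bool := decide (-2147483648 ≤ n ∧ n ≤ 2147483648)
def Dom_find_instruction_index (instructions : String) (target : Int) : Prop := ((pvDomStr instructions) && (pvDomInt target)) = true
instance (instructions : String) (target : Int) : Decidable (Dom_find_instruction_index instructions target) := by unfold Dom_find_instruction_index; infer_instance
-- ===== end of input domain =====

-- B builds the full prefix-sum (floor) list via a delta dictionary and answers with one
-- list.index lookup (default 0), instead of A's fused update/compare/break loop (objective: alternative).

-- ===== PORT A =====
-- A's for-loop with early break: floor accumulator, idx counter; returns 0 if no break.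
def pvAuxA (target : Int) : List Char → Int → Int → Int
  | [], _, _ => 0
  | c :: cs, floor, idx =>
    let floor' := if c = ')' then floor - 1 else if c = '(' then floor + 1 else floor
    if floor' = target then idx else pvAuxA target cs floor' (idx + 1)

def find_instruction_index (instructions : String) (target : Int) : Int :=
  pvAuxA target instructions.toList 0 0

-- ===== PORT B =====
def pvDelta : PySem.Dict Char Int := PySem.Dict.ofList [('(', 1), (')', -1)]

def find_instruction_index_alt (instructions : String) (target : Int) : Int :=
  let floors := (instructions.toList.foldl
      (fun (p : List Int × Int) c =>
        let f := p.2 + pvDelta.getD c 0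
        (p.1 ++ [f], f)) ([], 0)).1
  if floors.contains target then ((PySem.List.index? floors target).getD 0 : Nat) else 0

-- ===== PRECONDITION & SPEC =====
def Spec_find_instruction_index (instructions : String) (target : Int) (out : Int) : Prop := out = find_instruction_index_alt instructions target
instance (instructions : String) (target : Int) (out : Int) : Decidable (Spec_find_instruction_index instructions target out) := by unfold Spec_find_instruction_index; infer_instance

-- ===== CLAIM (what is proved, stated in full; the proofs are below) =====
def Claim_equal_find_instruction_index : Prop := ∀ (instructions : String) (target : Int), Dom_find_instruction_index instructions target → Spec_find_instruction_index instructions target (find_instruction_index instructions target)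

-- ===== LEMMAS AND PROOFS =====

-- the prefix-floor list B's fold builds, in structural form
def pvFloors (run : Int) : List Char → List Int
  | [] => []
  | c :: cs => (run + pvDelta.getD c 0) :: pvFloors (run + pvDelta.getD c 0) cs

lemma pvFoldl_floors : ∀ (cs : List Char) (acc : List Int) (run : Int),
    (cs.foldl (fun (p : List Int × Int) c =>
        let f := p.2 + pvDelta.getD c 0
        (p.1 ++ [f], f)) (acc, run)).1 = acc ++ pvFloors run cs := by
  intro cs
  induction cs with
  | nil => intro acc run; simp [pvFloors]
  | cons c cs ih => intro acc run; simp [pvFloors, ih, List.append_assoc]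

lemma pvBranch_eq_delta (c : Char) (r : Int) :
    (if c = ')' then r - 1 else if c = '(' then r + 1 else r) = r + pvDelta.getD c 0 := by
  have hmk : pvDelta = PySem.Dict.mk [('(', 1), (')', -1)] := by decide
  by_cases h1 : c = ')'
  · subst h1
    have : pvDelta.getD ')' 0 = -1 := by decide
    rw [this]; simp; ring
  · by_cases h2 : c = '('
    · subst h2
      have : pvDelta.getD '(' 0 = 1 := by decide
      rw [this]; simp [h1]
    · have : pvDelta.getD c 0 = 0 := by
        rw [hmk]
        simp [PySem.Dict.getD, PySem.Dict.get?_mk_cons, PySem.Dict.get?, Ne.symm h1, Ne.symm h2]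
      rw [this]; simp [h1, h2]

lemma pvAuxA_eq_index? (t : Int) : ∀ (cs : List Char) (run i : Int),
    pvAuxA t cs run i =
      match PySem.List.index? (pvFloors run cs) t with
      | some j => i + (j : Int)
      | none => 0 := by
  intro cs
  induction cs with
  | nil =>
    intro run i
    have : PySem.List.index? (pvFloors run ([] : List Char)) t = none :=
      (PySem.List.index?_eq_none_iff _ _).mpr (by simp [pvFloors])
    rw [this]; simp [pvAuxA]
  | cons c cs ih =>
    intro run i
    rw [pvAuxA, pvBranch_eq_delta c run]
    by_cases hf : run + pvDelta.getD c 0 = t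
    · simp only [if_pos hf, pvFloors, hf, PySem.List.index?_cons_self]
      simp
    · rw [if_neg hf, ih]
      simp only [pvFloors]
      rw [PySem.List.index?_cons_of_ne _ hf]
      cases h : PySem.List.index? (pvFloors (run + pvDelta.getD c 0) cs) t with
      | none => simp
      | some j => simp [Option.map_some]; push_cast; ring

-- ===== VERDICT (by name: the statement is the Claim_ definition above) =====
theorem find_instruction_index_spec : Claim_equal_find_instruction_index := by
  intro instructions target _
  unfold Spec_find_instruction_index find_instruction_index find_instruction_index_alt
  rw [pvAuxA_eq_index? target instructions.toList 0 0]
  simp only [pvFoldl_floors instructions.toList [] 0, List.nil_append]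
  cases h : PySem.List.index? (pvFloors 0 instructions.toList) target with
  | none =>
    have hmem : target ∉ pvFloors 0 instructions.toList :=
      (PySem.List.index?_eq_none_iff _ _).mp h
    simp [h, hmem]
  | some j =>
    have hmem : target ∈ pvFloors 0 instructions.toList :=
      (PySem.List.index?_isSome_iff _ _).mp (by rw [h]; rfl)
    simp [h, hmem]
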